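-- pv_equiv track=rewrite | github.com/N0Xl0US/oSHInT | maigret/intake/resume_parser.py | _repair_split_name_tokens
-- ===== SOURCE A (Python) =====
-- def _repair_split_name_tokens(tokens: list[str]) -> list[str]:
--     """
--     Merge OCR/PDF artifacts like "S econdname" into "Secondname".
--
--     Only merges when a single-letter alpha token is followed by a token that
--     starts with lowercase (to avoid changing initials like "J. R. R.").
--     """
--     repaired: list[str] = []
--     idx = 0
--
--     while idx < len(tokens):
--         current = tokens[idx]
--         nxt = tokens[idx + 1] if idx + 1 < len(tokens) else ""
--
--         if (
--             len(current) == 1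
--             and current.isalpha()
--             and nxt
--             and nxt[0].islower()
--         ):
--             repaired.append(f"{current}{nxt}")
--             idx += 2
--             continue
--
--         repaired.append(current)
--         idx += 1
--
--     return repaired
-- ===== SOURCE B (Python) =====
-- def _repair_split_name_tokens(tokens: list[str]) -> list[str]:
--     """Single left-to-right fold: glue a lowercase-starting token onto a
--     previously emitted single-letter alpha token, else append."""
--     repaired: list[str] = []
--     for t in tokens:
--         if repaired and len(repaired[-1]) == 1 and repaired[-1].isalpha() and t and t[0].islower():
--             repaired[-1] = repaired[-1] + t
--         else:
--             repaired.append(t)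
--     return repaired
-- ===== Notes on version B (the rewrite author's own statement) =====
-- stated objective: simpler
-- what changed: Replaced the index-based while loop with lookahead and idx+=2 skipping by a single fold over the tokens that decides using the accumulator's last emitted token and glues onto it in place.
import Mathlib
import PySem

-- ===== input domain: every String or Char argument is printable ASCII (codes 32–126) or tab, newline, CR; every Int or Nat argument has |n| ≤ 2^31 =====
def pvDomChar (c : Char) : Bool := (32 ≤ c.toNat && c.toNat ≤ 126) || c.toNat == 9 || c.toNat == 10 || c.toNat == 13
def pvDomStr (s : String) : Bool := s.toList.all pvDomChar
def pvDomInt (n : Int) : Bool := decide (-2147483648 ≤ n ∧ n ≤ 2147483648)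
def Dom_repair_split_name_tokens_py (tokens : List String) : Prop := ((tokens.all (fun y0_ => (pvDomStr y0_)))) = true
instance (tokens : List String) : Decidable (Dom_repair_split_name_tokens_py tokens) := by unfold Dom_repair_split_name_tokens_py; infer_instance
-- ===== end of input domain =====

-- B replaces A's index-based while loop with lookahead and idx+=2 skipping by a
-- single fold that decides from the accumulator's last emitted token (objective: simpler).

-- ===== PORT A =====
-- the merge condition both Pythons spell out verbatim:
-- len(x) == 1 and x.isalpha() and t and t[0].islower()
def pvMergeCond (x t : String) : Bool :=
  (PySem.Str.len x == 1) && PySem.Str.strIsalpha x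
    && !t.toList.isEmpty && PySem.Chars.islower (t.toList.headD ' ')

-- A's while loop: looks at tokens[idx] and tokens[idx+1] (or "" past the end), skips two on a merge
def repair_split_name_tokens_py (tokens : List String) : List String :=
  match tokens with
  | [] => []
  | [current] =>
      -- nxt = "" here, so the merge condition (which needs nxt truthy) is always false
      if pvMergeCond current "" then [] else [current]
  | current :: nxt :: rest =>
      if pvMergeCond current nxt then
        String.ofList (current.toList ++ nxt.toList) :: repair_split_name_tokens_py rest
      else
        current :: repair_split_name_tokens_py (nxt :: rest)

-- ===== PORT B =====
-- B's per-token step: glue t onto repaired[-1] when it is a single alpha letter and t starts lowercase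
def pvStepB (repaired : List String) (t : String) : List String :=
  match repaired.getLast? with
  | some last =>
      if pvMergeCond last t then repaired.dropLast ++ [String.ofList (last.toList ++ t.toList)]
      else repaired ++ [t]
  | none => repaired ++ [t]

def repair_split_name_tokens_py_alt (tokens : List String) : List String :=
  tokens.foldl pvStepB []

-- ===== PRECONDITION & SPEC =====
def Spec_repair_split_name_tokens_py (tokens : List String) (out : List String) : Prop := out = repair_split_name_tokens_py_alt tokens
instance (tokens : List String) (out : List String) : Decidable (Spec_repair_split_name_tokens_py tokens out) := by unfold Spec_repair_split_name_tokens_py; infer_instance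

-- ===== CLAIM (what is proved, stated in full; the proofs are below) =====
def Claim_equal_repair_split_name_tokens_py : Prop := ∀ (tokens : List String), Dom_repair_split_name_tokens_py tokens → Spec_repair_split_name_tokens_py tokens (repair_split_name_tokens_py tokens)

-- ===== LEMMAS AND PROOFS =====

-- pvStepB only looks at the accumulator's last element: a nonempty accumulator can be shifted
theorem pvStepB_append (pre acc : List String) (t : String) (h : acc ≠ []) :
    pvStepB (pre ++ acc) t = pre ++ pvStepB acc t := by
  rcases List.eq_nil_or_concat acc with rfl | ⟨as, a, rfl⟩
  · exact absurd rfl h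
  · unfold pvStepB
    simp only [List.concat_eq_append, ← List.append_assoc]
    have hg : ∀ (l : List String), (l ++ [a]).getLast? = some a := fun l => by simp
    have hd : ∀ (l : List String), (l ++ [a]).dropLast = l := fun l => by simp
    rw [hg, hg, hd, hd]
    by_cases hc : pvMergeCond a t = true
    · simp [hc]
    · simp [hc, List.append_assoc]

theorem pvStepB_ne_nil (acc : List String) (t : String) :
    pvStepB acc t ≠ [] := by
  unfold pvStepB
  split
  · split_ifs <;> simp
  · simp

-- fold from a shifted accumulator
theorem pvFoldB_append (tokens : List String) :
    ∀ (pre acc : List String), acc ≠ [] →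
      tokens.foldl pvStepB (pre ++ acc) = pre ++ tokens.foldl pvStepB acc := by
  induction tokens with
  | nil => intro pre acc _; simp
  | cons t ts ih =>
      intro pre acc h
      simp only [List.foldl_cons]
      rw [pvStepB_append pre acc t h, ih pre _ (pvStepB_ne_nil acc t)]

-- a token that is not a single alpha letter can never be merged onto
theorem pvStepB_safe (l t : String)
    (h : ((PySem.Str.len l == 1) && PySem.Str.strIsalpha l) = false) :
    pvStepB [l] t = [l, t] := by
  have hc : pvMergeCond l t = false := by
    unfold pvMergeCond; rw [h]; rfl
  unfold pvStepB
  simp [hc]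

theorem pvFoldB_safe_head (tokens : List String) (l : String)
    (h : ((PySem.Str.len l == 1) && PySem.Str.strIsalpha l) = false) :
    tokens.foldl pvStepB [l] = l :: tokens.foldl pvStepB [] := by
  cases tokens with
  | nil => rfl
  | cons t ts =>
      simp only [List.foldl_cons]
      rw [pvStepB_safe l t h]
      have h2 : ([l, t] : List String) = [l] ++ [t] := rfl
      rw [h2, pvFoldB_append ts [l] [t] (by simp)]
      rfl

-- a merged token has length ≥ 2, hence is never merged onto again
theorem pvMerged_safe (current nxt : String) (h : pvMergeCond current nxt = true) :
    ((PySem.Str.len (String.ofList (current.toList ++ nxt.toList)) == 1)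
      && PySem.Str.strIsalpha (String.ofList (current.toList ++ nxt.toList))) = false := by
  unfold pvMergeCond at h
  simp only [Bool.and_eq_true, beq_iff_eq] at h
  obtain ⟨⟨⟨hlen, _⟩, hne⟩, _⟩ := h
  have hlen' : current.toList.length = 1 := by
    have h1 := PySem.Str.len_eq current
    omega
  have hnxt : 1 ≤ nxt.toList.length := by
    cases hl : nxt.toList with
    | nil => rw [hl] at hne; simp at hne
    | cons a as => simp
  have hbig : (String.ofList (current.toList ++ nxt.toList)).toList.length ≠ 1 := by
    rw [String.toList_ofList, List.length_append]
    omega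
  have hfalse : (PySem.Str.len (String.ofList (current.toList ++ nxt.toList)) == 1) = false := by
    rw [PySem.Str.len_eq]
    simp only [beq_eq_false_iff_ne, ne_eq]
    intro habs
    apply hbig
    omega
  rw [hfalse, Bool.false_and]

theorem pvMain (tokens : List String) :
    repair_split_name_tokens_py tokens = tokens.foldl pvStepB [] := by
  induction tokens using repair_split_name_tokens_py.induct with
  | case1 => rfl
  | case2 current hc =>
      exact absurd hc (by unfold pvMergeCond; simp)
  | case3 current hc =>
      simp only [repair_split_name_tokens_py, if_neg hc, List.foldl_cons, List.foldl_nil]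
      rfl
  | case4 current nxt rest hc ih =>
      simp only [repair_split_name_tokens_py, if_pos hc, List.foldl_cons]
      have h1 : pvStepB [] current = [current] := rfl
      rw [h1]
      have h2 : pvStepB [current] nxt =
          [String.ofList (current.toList ++ nxt.toList)] := by
        unfold pvStepB
        simp [hc]
      rw [h2, pvFoldB_safe_head rest _ (pvMerged_safe current nxt hc), ih]
  | case5 current nxt rest hc ih =>
      simp only [repair_split_name_tokens_py, if_neg hc, List.foldl_cons]
      have h1 : pvStepB [] current = [current] := rfl
      rw [h1]
      have h2 : pvStepB [current] nxt = [current, nxt] := by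
        unfold pvStepB
        simp [Bool.of_not_eq_true hc]
      rw [h2]
      have h3 : ([current, nxt] : List String) = [current] ++ [nxt] := rfl
      rw [h3, pvFoldB_append rest [current] [nxt] (by simp)]
      rw [show ([nxt] : List String) = pvStepB [] nxt from rfl, ← List.foldl_cons]
      rw [ih]
      rfl

-- ===== VERDICT (by name: the statement is the Claim_ definition above) =====
theorem repair_split_name_tokens_py_spec : Claim_equal_repair_split_name_tokens_py := by
  intro tokens _
  unfold Spec_repair_split_name_tokens_py repair_split_name_tokens_py_alt
  exact pvMain tokens
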